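-- pv_equiv track=rewrite | github.com/spillay/AHRM | DeceptionEngine/liwc.py | replaceandcount
-- ===== SOURCE A (Python) =====
-- def replaceandcount(text, symbols, replacement):
--     """
--     Replace every symbol in the *text* with a given *replacement* and return a tuple of
--     a new text and the replacement count. *symbols* is a string of characters where each of
--     them will be replaced with *replacement*.
--     """
--     counts = dict()
--     text = list(text)
--     r = range(len(symbols))
--     for i in r:
--         counts[symbols[i]] = 0
--
--     r = range(len(text))
--     for i in r:
--         if text[i] in symbols:
--             counts[text[i]] += 1
--             text[i] = replacement
--     return (''.join(text), counts)
-- ===== SOURCE B (Python) =====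
-- def replaceandcount(text, symbols, replacement):
--     counts = {s: text.count(s) for s in symbols}
--     symset = set(symbols)
--     new_text = ''.join(replacement if c in symset else c for c in text)
--     return (new_text, counts)
-- ===== Notes on version B (the rewrite author's own statement) =====
-- stated objective: simpler
-- what changed: Replaces A's fused stateful loop (pre-initialised dict mutated while rewriting a list copy of the text in place) with two independent passes: a dict comprehension computing each symbol's count via text.count, and a join over a generator that substitutes characters via a set membership test.
import Mathlib
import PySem

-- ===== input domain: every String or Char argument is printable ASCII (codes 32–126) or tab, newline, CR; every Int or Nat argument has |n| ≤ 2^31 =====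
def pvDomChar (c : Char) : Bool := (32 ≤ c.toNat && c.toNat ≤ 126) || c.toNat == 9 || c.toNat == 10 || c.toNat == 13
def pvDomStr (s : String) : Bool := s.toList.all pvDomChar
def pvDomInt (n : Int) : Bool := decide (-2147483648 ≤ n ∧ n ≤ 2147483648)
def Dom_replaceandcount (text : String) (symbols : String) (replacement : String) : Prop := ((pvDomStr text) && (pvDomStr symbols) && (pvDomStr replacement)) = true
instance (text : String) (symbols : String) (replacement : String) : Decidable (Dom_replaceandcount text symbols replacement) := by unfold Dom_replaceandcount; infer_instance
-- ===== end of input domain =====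

-- B replaces A's single fused loop (zero-init dict then count-and-replace in a list copy of the text)
-- with two independent passes: a per-symbol count table and a separate substitution pass (objective: simpler).

-- ===== PORT A =====
-- A's single fused loop: first zero-initialise counts over symbols, then one pass over the
-- text that simultaneously increments the count and overwrites the character in the list copy.
def replaceandcount (text : String) (symbols : String) (replacement : String) : String × (List (String × Int)) :=
  let counts0 : PySem.Dict String Int :=
    symbols.toList.foldl (fun d c => d.insert (String.ofList [c]) 0) PySem.Dict.empty
  let r :=
    text.toList.foldl
      (fun (st : List Char × PySem.Dict String Int) c =>
        if symbols.toList.contains c then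
          (st.1 ++ replacement.toList, st.2.modify (String.ofList [c]) 0 (· + 1))
        else (st.1 ++ [c], st.2))
      ([], counts0)
  (String.ofList r.1, r.2.items)

-- ===== PORT B =====
-- B's two independent passes: a dict comprehension {s: text.count(s) for s in symbols},
-- and a join over a substitution via a set membership test.
def replaceandcount_alt (text : String) (symbols : String) (replacement : String) : String × (List (String × Int)) :=
  let counts : PySem.Dict String Int :=
    symbols.toList.foldl (fun d c => d.insert (String.ofList [c]) (text.toList.count c : Int)) PySem.Dict.empty
  let symset : PySem.Set Char := PySem.Set.ofList symbols.toList
  let newText := String.ofList (text.toList.flatMap (fun c => if PySem.Set.contains symset c then replacement.toList else [c]))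
  (newText, counts.items)

-- ===== PRECONDITION & SPEC =====
def Spec_replaceandcount (text : String) (symbols : String) (replacement : String) (out : String × (List (String × Int))) : Prop := out = replaceandcount_alt text symbols replacement
instance (text : String) (symbols : String) (replacement : String) (out : String × (List (String × Int))) : Decidable (Spec_replaceandcount text symbols replacement out) := by unfold Spec_replaceandcount; infer_instance

-- ===== CLAIM (what is proved, stated in full; the proofs are below) =====
def Claim_equal_replaceandcount : Prop := ∀ (text : String) (symbols : String) (replacement : String), Dom_replaceandcount text symbols replacement → Spec_replaceandcount text symbols replacement (replaceandcount text symbols replacement)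

-- ===== LEMMAS AND PROOFS =====

-- a fold over a pair whose components are updated independently splits into two folds
theorem pv_foldl_pair {α β χ : Type} (f : α → χ → α) (g : β → χ → β) (l : List χ) (a : α) (b : β) :
    l.foldl (fun st c => (f st.1 c, g st.2 c)) (a, b) = (l.foldl f a, l.foldl g b) := by
  induction l generalizing a b with
  | nil => rfl
  | cons c t ih => simp [List.foldl, ih]

-- a guarded fold skips exactly the elements failing the guard
theorem pv_foldl_if_filter {α χ : Type} (p : χ → Bool) (m : α → χ → α) (l : List χ) (a : α) :
    l.foldl (fun d c => if p c then m d c else d) a = (l.filter p).foldl m a := by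
  induction l generalizing a with
  | nil => rfl
  | cons c t ih => by_cases h : p c <;> simp [List.foldl, h, ih]

theorem pv_key_inj : Function.Injective (fun c : Char => String.ofList [c]) := by
  intro a b h
  have h2 := congrArg String.toList h
  simpa using h2

-- zero-initialisation leaves every getD-with-default-0 at 0
theorem pv_getD_init_zero (l : List Char) (d : PySem.Dict String Int)
    (h : ∀ k, d.getD k 0 = 0) (k : String) :
    (l.foldl (fun d c => d.insert (String.ofList [c]) 0) d).getD k 0 = 0 := by
  induction l generalizing d with
  | nil => exact h k
  | cons c t ih =>
    simp only [List.foldl]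
    refine ih _ (fun k' => ?_)
    rw [PySem.Dict.getD_insert]
    split <;> simp [h]

-- folding inserts over symbols not containing c leaves c's entry alone
theorem pv_getD_skip (text : List Char) (l : List Char) (c : Char) (hnc : c ∉ l)
    (d : PySem.Dict String Int) :
    (l.foldl (fun d c => d.insert (String.ofList [c]) (text.count c : Int)) d).getD (String.ofList [c]) 0
      = d.getD (String.ofList [c]) 0 := by
  induction l generalizing d with
  | nil => rfl
  | cons x xs ihx =>
    simp only [List.foldl]
    rw [ihx (fun hmem => hnc (List.mem_cons_of_mem _ hmem))]
    rw [PySem.Dict.getD_insert]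
    have hne : String.ofList [c] ≠ String.ofList [x] := by
      intro he
      exact hnc (by rw [pv_key_inj he]; exact List.mem_cons_self)
    simp [hne]

-- the comprehension dict stores each listed symbol's count (duplicates overwrite with the same value)
theorem pv_getD_comprehension (text : List Char) (l : List Char) (d : PySem.Dict String Int)
    (c : Char) (hc : c ∈ l) :
    (l.foldl (fun d c => d.insert (String.ofList [c]) (text.count c : Int)) d).getD (String.ofList [c]) 0
      = (text.count c : Int) := by
  induction l generalizing d with
  | nil => exact absurd hc (List.not_mem_nil)
  | cons c' t ih =>
    simp only [List.foldl]
    by_cases h : c ∈ t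
    · exact ih _ h
    · have hcc : c = c' := by
        rcases List.mem_cons.mp hc with h1 | h2
        · exact h1
        · exact absurd h2 h
      subst hcc
      rw [pv_getD_skip text t c h]
      rw [PySem.Dict.getD_insert]
      simp

-- Set.update adds nothing when every element is already present
theorem pv_update_of_subset {α : Type} [BEq α] [LawfulBEq α] (xs : List α) (s : PySem.Set α)
    (h : ∀ x ∈ xs, x ∈ s) : PySem.Set.update s xs = s := by
  induction xs generalizing s with
  | nil => rfl
  | cons x t ih =>
    have hx : x ∈ s := h x List.mem_cons_self
    have hadd : PySem.Set.add s x = s := by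
      simp [PySem.Set.add, PySem.Set.contains, hx]
    simp only [PySem.Set.update, List.foldl]
    rw [show (List.foldl PySem.Set.add (PySem.Set.add s x) t) = PySem.Set.update (PySem.Set.add s x) t from rfl]
    rw [hadd]
    exact ih s (fun y hy => h y (List.mem_cons_of_mem _ hy))

theorem pv_contains_ofList {α : Type} [BEq α] [LawfulBEq α] (xs : List α) (c : α) :
    PySem.Set.contains (PySem.Set.ofList xs) c = xs.contains c := by
  simp [PySem.Set.contains, PySem.Set.mem_ofList]

theorem replaceandcount_eq (text symbols replacement : String) :
    replaceandcount text symbols replacement = replaceandcount_alt text symbols replacement := by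
  unfold replaceandcount replaceandcount_alt
  simp only []
  set key : Char → String := fun c => String.ofList [c] with hkey
  -- split A's fused pair fold
  have hsplit :
      (text.toList.foldl
        (fun (st : List Char × PySem.Dict String Int) c =>
          if symbols.toList.contains c then
            (st.1 ++ replacement.toList, st.2.modify (String.ofList [c]) 0 (· + 1))
          else (st.1 ++ [c], st.2))
        ([], symbols.toList.foldl (fun d c => d.insert (String.ofList [c]) 0) PySem.Dict.empty))
      = (text.toList.foldl
          (fun acc c => if symbols.toList.contains c then acc ++ replacement.toList else acc ++ [c]) [],
         text.toList.foldl
          (fun d c => if symbols.toList.contains c then d.modify (String.ofList [c]) 0 (· + 1) else d)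
          (symbols.toList.foldl (fun d c => d.insert (String.ofList [c]) 0) PySem.Dict.empty)) := by
    rw [show
      (fun (st : List Char × PySem.Dict String Int) c =>
        if symbols.toList.contains c then
          (st.1 ++ replacement.toList, st.2.modify (String.ofList [c]) 0 (· + 1))
        else (st.1 ++ [c], st.2))
      = (fun (st : List Char × PySem.Dict String Int) c =>
          ((fun acc c => if symbols.toList.contains c then acc ++ replacement.toList else acc ++ [c]) st.1 c,
           (fun d c => if symbols.toList.contains c then d.modify (String.ofList [c]) 0 (· + 1) else d) st.2 c))
      from by funext st c; by_cases hm : c ∈ symbols.toList <;> simp [hm]]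
    exact pv_foldl_pair
      (fun (acc : List Char) (c : Char) => if symbols.toList.contains c then acc ++ replacement.toList else acc ++ [c])
      (fun (d : PySem.Dict String Int) (c : Char) => if symbols.toList.contains c then d.modify (String.ofList [c]) 0 (· + 1) else d)
      text.toList [] _
  rw [hsplit]
  refine Prod.ext ?_ ?_
  · -- text component
    simp only []
    congr 1
    have : (fun (acc : List Char) c => if symbols.toList.contains c then acc ++ replacement.toList else acc ++ [c])
        = (fun acc c => acc ++ (if symbols.toList.contains c then replacement.toList else [c])) := by
      funext acc c; by_cases hm : c ∈ symbols.toList <;> simp [hm]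
    rw [this, PySem.List.foldl_append_eq_flatMap]
    simp only [List.nil_append]
    congr 1
    funext c
    rw [pv_contains_ofList]
  · -- counts component
    simp only []
    set p : Char → Bool := fun c => symbols.toList.contains c with hp
    set d0 : PySem.Dict String Int :=
      symbols.toList.foldl (fun d c => d.insert (String.ofList [c]) 0) PySem.Dict.empty with hd0
    set dB : PySem.Dict String Int :=
      symbols.toList.foldl (fun d c => d.insert (String.ofList [c]) (text.toList.count c : Int)) PySem.Dict.empty with hdB
    have hk0 : d0.keys = PySem.Set.update PySem.Dict.empty.keys (symbols.toList.map key) :=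
      PySem.Dict.keys_foldl_insert_key symbols.toList key (fun _ c => (0 : Int)) PySem.Dict.empty
    have hkB : dB.keys = PySem.Set.update PySem.Dict.empty.keys (symbols.toList.map key) :=
      PySem.Dict.keys_foldl_insert_key symbols.toList key (fun _ c => (text.toList.count c : Int)) PySem.Dict.empty
    have hnd0 : d0.keys.Nodup :=
      PySem.Dict.nodup_keys_foldl_insert_key symbols.toList key _ PySem.Dict.empty (by simp)
    have hndB : dB.keys.Nodup :=
      PySem.Dict.nodup_keys_foldl_insert_key symbols.toList key _ PySem.Dict.empty (by simp)
    set dA : PySem.Dict String Int :=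
      text.toList.foldl (fun d c => if p c then d.modify (String.ofList [c]) 0 (· + 1) else d) d0 with hdA
    have filtfold : dA = (text.toList.filter p).foldl (fun d c => d.modify (String.ofList [c]) 0 (· + 1)) d0 :=
      pv_foldl_if_filter p _ text.toList d0
    have hkA : dA.keys = d0.keys := by
      rw [filtfold]
      rw [PySem.Dict.keys_foldl_modify_key (text.toList.filter p) key 0 (fun _ _ v => v + 1) d0]
      refine pv_update_of_subset _ _ ?_
      intro x hx
      rcases List.mem_map.mp hx with ⟨c, hc, rfl⟩
      have hcp : p c = true := (List.mem_filter.mp hc).2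
      have hcs : c ∈ symbols.toList := by
        simpa [hp, List.contains_iff_mem] using hcp
      rw [hk0]
      have : key c ∈ symbols.toList.map key := List.mem_map_of_mem hcs
      -- membership of update: update s xs contains all of xs
      -- update [] xs = ofList xs since keys_empty = []
      simp only [PySem.Dict.keys_empty]
      rw [show PySem.Set.update ([] : PySem.Set String) (symbols.toList.map key)
            = PySem.Set.ofList (symbols.toList.map key) from rfl]
      exact (PySem.Set.mem_ofList _ _).mpr this
    have hndA : dA.keys.Nodup := hkA ▸ hnd0
    -- items equality via keys and getD
    rw [PySem.Dict.items_eq_map_keys dA hndA 0, PySem.Dict.items_eq_map_keys dB hndB 0]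
    rw [hkA, hk0, hkB]
    refine List.map_congr_left ?_
    intro k hk
    simp only [PySem.Dict.keys_empty] at hk
    rw [show PySem.Set.update ([] : PySem.Set String) (symbols.toList.map key)
          = PySem.Set.ofList (symbols.toList.map key) from rfl] at hk
    have hk' : k ∈ symbols.toList.map key := (PySem.Set.mem_ofList _ _).mp hk
    rcases List.mem_map.mp hk' with ⟨c, hcs, rfl⟩
    have hAv : dA.getD (key c) 0 = (text.toList.count c : Int) := by
      rw [filtfold]
      have : (text.toList.filter p).foldl (fun d c => d.modify (String.ofList [c]) 0 (· + 1)) d0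
          = ((text.toList.filter p).map key).foldl (fun d k => d.modify k 0 (· + 1)) d0 := by
        rw [List.foldl_map]
      rw [this, PySem.Dict.getD_foldl_modify_add_one]
      have hz : d0.getD (key c) 0 = 0 :=
        pv_getD_init_zero symbols.toList PySem.Dict.empty (by simp [PySem.Dict.getD_empty]) _
      rw [hz]
      have hcount : ((text.toList.filter p).map key).count (key c) = (text.toList.filter p).count c :=
        List.count_map_of_injective _ key pv_key_inj c
      rw [hcount]
      have hpc : p c = true := by simpa [hp, List.contains_iff_mem] using hcs
      rw [List.count_filter hpc]
      simp
    have hBv : dB.getD (key c) 0 = (text.toList.count c : Int) :=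
      pv_getD_comprehension text.toList symbols.toList PySem.Dict.empty c hcs
    rw [hAv, hBv]

-- ===== VERDICT (by name: the statement is the Claim_ definition above) =====
theorem replaceandcount_spec : Claim_equal_replaceandcount := by
  intro text symbols replacement _
  unfold Spec_replaceandcount
  exact replaceandcount_eq text symbols replacement
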